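-- pv_equiv track=rewrite | github.com/ocgully/taskflow | taskflow/spec_input.py | parse_lines_arg
-- ===== SOURCE A (Python) =====
-- from typing import Any, Dict, List, Optional, Tuple
--
-- def parse_lines_arg(raw: str) -> Tuple[int, int]:
--     """Parse '45-72' or '45:72' into (45, 72). Single '45' -> (45, 45)."""
--     if raw is None:
--         raise ValueError("empty --lines")
--     s = raw.strip()
--     if not s:
--         raise ValueError("empty --lines")
--     for sep in ("-", ":", ","):
--         if sep in s:
--             a, b = s.split(sep, 1)
--             return int(a.strip()), int(b.strip())
--     n = int(s)
--     return n, n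
-- ===== SOURCE B (Python) =====
-- from typing import Tuple
--
-- def parse_lines_arg(raw: str) -> Tuple[int, int]:
--     """Parse '45-72' or '45:72' into (45, 72). Single '45' -> (45, 45)."""
--     if raw is None:
--         raise ValueError("empty --lines")
--     s = raw.strip()
--     if not s:
--         raise ValueError("empty --lines")
--     for i, ch in enumerate(s):
--         if ch in "-:,":
--             return int(s[:i].strip()), int(s[i + 1:].strip())
--     n = int(s)
--     return n, n
-- ===== Notes on version B (the rewrite author's own statement) =====
-- stated objective: alternative
-- what changed: A loops over the three separator kinds in priority order and splits on the first kind found anywhere; B makes a single left-to-right scan of the string and splits at the first character that is any separator (the two coincide whenever A returns a value, since a successfully parsed left part can contain no separator character).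
import Mathlib
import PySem

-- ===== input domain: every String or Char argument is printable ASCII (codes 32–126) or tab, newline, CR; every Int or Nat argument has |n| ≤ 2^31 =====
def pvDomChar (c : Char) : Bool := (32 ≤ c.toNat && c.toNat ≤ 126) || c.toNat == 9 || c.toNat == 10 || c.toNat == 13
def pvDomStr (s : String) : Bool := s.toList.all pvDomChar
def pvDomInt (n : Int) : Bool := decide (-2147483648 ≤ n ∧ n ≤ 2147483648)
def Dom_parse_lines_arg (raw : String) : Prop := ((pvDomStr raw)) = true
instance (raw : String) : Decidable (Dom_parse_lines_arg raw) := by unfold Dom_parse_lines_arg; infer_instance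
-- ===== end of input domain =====

-- B replaces A's priority-ordered loop over the three separator kinds by a single
-- left-to-right scan that splits at the first separator character of any kind (alternative, same cost).

-- ===== PORT A =====
-- helper for "a, b = s.split(sep, 1); return int(a.strip()), int(b.strip())"
def pvSplitInt (s : List Char) (sep : Char) : Int × Int :=
  match PySem.Chars.splitOnMax s [sep] 1 with
  | a :: b :: _ =>
      ((PySem.Int.ofChars? (PySem.Chars.strip a)).getD 0,
       (PySem.Int.ofChars? (PySem.Chars.strip b)).getD 0)
  | _ => (0, 0)  -- unreachable: split(sep, 1) with sep present yields two parts

def parse_lines_arg (raw : String) : Int × Int :=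
  let s := PySem.Chars.strip raw.toList
  if PySem.Chars.isIn ['-'] s then pvSplitInt s '-'
  else if PySem.Chars.isIn [':'] s then pvSplitInt s ':'
  else if PySem.Chars.isIn [','] s then pvSplitInt s ','
  else
    let n := (PySem.Int.ofChars? s).getD 0
    (n, n)

-- ===== PORT B =====
-- the scan "for i, ch in enumerate(s): if ch in '-:,': return int(s[:i].strip()), int(s[i+1:].strip())"
def pvScan : List Char → Option (List Char × List Char)
  | [] => none
  | c :: rest =>
      if c = '-' ∨ c = ':' ∨ c = ',' then some ([], rest)
      else match pvScan rest with
           | some (l, r) => some (c :: l, r)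
           | none => none

def parse_lines_arg_alt (raw : String) : Int × Int :=
  let s := PySem.Chars.strip raw.toList
  match pvScan s with
  | some (a, b) =>
      ((PySem.Int.ofChars? (PySem.Chars.strip a)).getD 0,
       (PySem.Int.ofChars? (PySem.Chars.strip b)).getD 0)
  | none =>
      let n := (PySem.Int.ofChars? s).getD 0
      (n, n)

-- ===== PRECONDITION & SPEC =====
-- Pre_ = exactly the inputs on which the Python A returns (raises no ValueError): after the
-- outer strip the piece(s) A feeds to int() must be what int() accepts — optional whitespace,
-- optional sign, then digits with single underscores between digits (exact on the ASCII domain).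
def pvSpace (c : Char) : Bool :=
  c = ' ' ∨ c = '\t' ∨ c = '\n' ∨ c = '\r' ∨ c = '\x0b' ∨ c = '\x0c'

def pvTail : List Char → Bool
  | [] => true
  | '_' :: d :: rest => d.isDigit && pvTail rest
  | ['_'] => false
  | c :: rest => if c.isDigit then pvTail rest else pvSpace c && rest.all pvSpace

def pvCore : List Char → Bool
  | [] => false
  | c :: rest => c.isDigit && pvTail rest

-- cs is accepted by Python's int(): ws*, optional sign, digits with single '_' between digits, ws*
def pvIntLit (cs : List Char) : Bool :=
  match cs.dropWhile pvSpace with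
  | '+' :: ds => pvCore ds
  | '-' :: ds => pvCore ds
  | ds => pvCore ds

def pvSplitOK (s : List Char) (sep : Char) : Prop :=
  pvIntLit (s.takeWhile (· ≠ sep)) = true ∧ pvIntLit ((s.dropWhile (· ≠ sep)).tail) = true

def Pre_parse_lines_arg (raw : String) : Prop :=
  let s := PySem.Chars.strip raw.toList
  if '-' ∈ s then pvSplitOK s '-'
  else if ':' ∈ s then pvSplitOK s ':'
  else if ',' ∈ s then pvSplitOK s ','
  else pvIntLit s = true
instance (raw : String) : Decidable (Pre_parse_lines_arg raw) := by
  unfold Pre_parse_lines_arg pvSplitOK; infer_instance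

def pvWitness_parse_lines_arg : String := "45-72"

def Spec_parse_lines_arg (raw : String) (out : Int × Int) : Prop := out = parse_lines_arg_alt raw
instance (raw : String) (out : Int × Int) : Decidable (Spec_parse_lines_arg raw out) := by unfold Spec_parse_lines_arg; infer_instance

-- ===== CLAIM (what is proved, stated in full; the proofs are below) =====
def Claim_equal_parse_lines_arg : Prop := ∀ (raw : String), Dom_parse_lines_arg raw → Pre_parse_lines_arg raw → Spec_parse_lines_arg raw (parse_lines_arg raw)

-- ===== LEMMAS AND PROOFS =====

-- characters an int() literal may contain
def pvOk (c : Char) : Bool := c.isDigit || c = '_' || pvSpace c || c = '+' || c = '-'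

theorem pvTail_ok (l : List Char) (h : pvTail l = true) : ∀ x ∈ l, pvOk x = true := by
  fun_induction pvTail l with
  | case1 => simp
  | case2 d rest ih =>
      simp only [Bool.and_eq_true] at h
      intro x hx
      simp only [List.mem_cons] at hx
      rcases hx with rfl | rfl | hx
      · simp [pvOk]
      · simp [pvOk, h.1]
      · exact ih h.2 x hx
  | case3 => simp at h
  | case4 c rest _ _ hdig ih =>
      intro x hx
      simp only [List.mem_cons] at hx
      rcases hx with rfl | hx
      · simp [pvOk, hdig]
      · exact ih h x hx
  | case5 c rest _ _ _ =>
      simp only [Bool.and_eq_true] at h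
      intro x hx
      simp only [List.mem_cons] at hx
      rcases hx with rfl | hx
      · simp [pvOk, h.1]
      · have := (List.all_eq_true.mp h.2) x hx
        simp [pvOk, this]

theorem pvCore_ok (l : List Char) (h : pvCore l = true) : ∀ x ∈ l, pvOk x = true := by
  cases l with
  | nil => simp
  | cons c rest =>
      simp only [pvCore, Bool.and_eq_true] at h
      intro x hx
      simp only [List.mem_cons] at hx
      rcases hx with rfl | hx
      · simp [pvOk, h.1]
      · exact pvTail_ok rest h.2 x hx

theorem pvIntLit_ok (cs : List Char) (h : pvIntLit cs = true) : ∀ x ∈ cs, pvOk x = true := by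
  intro x hx
  have hsplit : cs.takeWhile pvSpace ++ cs.dropWhile pvSpace = cs := List.takeWhile_append_dropWhile
  rw [← hsplit] at hx
  rcases List.mem_append.mp hx with hx | hx
  · have := List.mem_takeWhile_imp hx
    simp [pvOk, this]
  · unfold pvIntLit at h
    split at h
    case _ ds heq =>
        rw [heq] at hx
        rcases List.mem_cons.mp hx with rfl | hx
        · simp [pvOk]
        · exact pvCore_ok ds h x hx
    case _ ds heq =>
        rw [heq] at hx
        rcases List.mem_cons.mp hx with rfl | hx
        · simp [pvOk]
        · exact pvCore_ok ds h x hx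
    case _ => exact pvCore_ok _ h x hx

-- an int() literal contains neither ':' nor ','
theorem pvIntLit_ne (cs : List Char) (h : pvIntLit cs = true) {x : Char} (hx : x ∈ cs) :
    x ≠ ':' ∧ x ≠ ',' := by
  have := pvIntLit_ok cs h x hx
  constructor <;> rintro rfl <;> simp [pvOk, pvSpace] at this

-- ----- the split-once primitive, on a single present separator -----
theorem goZero (c : Char) : ∀ (fuel : Nat) (l cur : List Char) (acc : List (List Char)),
    PySem.Chars.splitOnMax.go [c] fuel 0 l cur acc = ((cur.reverse ++ l) :: acc).reverse := by
  intro fuel l cur acc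
  cases fuel with
  | zero => rw [PySem.Chars.splitOnMax.go]
  | succ f => cases l with
    | nil => rw [PySem.Chars.splitOnMax.go] <;> simp
    | cons x rest => rw [PySem.Chars.splitOnMax.go]; simp

theorem goSplit (c : Char) : ∀ (l : List Char) (fuel : Nat) (cur : List Char) (acc : List (List Char)),
    c ∈ l → l.length < fuel →
    PySem.Chars.splitOnMax.go [c] fuel 1 l cur acc =
      acc.reverse ++ [cur.reverse ++ l.takeWhile (· ≠ c), (l.dropWhile (· ≠ c)).tail] := by
  intro l
  induction l with
  | nil => intro fuel cur acc hmem; simp at hmem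
  | cons x rest ih =>
      intro fuel cur acc hmem hlen
      cases fuel with
      | zero => omega
      | succ f =>
        rw [PySem.Chars.splitOnMax.go]
        by_cases hx : x = c
        · subst hx
          have hpre : [x].isPrefixOf (x :: rest) = true := by simp [List.isPrefixOf]
          simp only [hpre, if_true, if_neg (by omega : ¬(1:Nat) = 0)]
          rw [goZero]
          simp [List.takeWhile, List.dropWhile]
        · have hpre : [c].isPrefixOf (x :: rest) = false := by
            simp [List.isPrefixOf]; exact fun h => (hx h.symm).elim
          simp only [hpre, if_neg (by omega : ¬(1:Nat) = 0), Bool.false_eq_true, if_false]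
          have hmem' : c ∈ rest := by
            cases hmem with | head => exact (hx rfl).elim | tail _ h => exact h
          rw [ih f (x :: cur) acc hmem' (by simpa using Nat.lt_of_succ_lt_succ hlen)]
          simp [List.takeWhile, List.dropWhile, hx]

theorem splitOnMax_single (s : List Char) (c : Char) (h : c ∈ s) :
    PySem.Chars.splitOnMax s [c] 1 =
      [s.takeWhile (· ≠ c), (s.dropWhile (· ≠ c)).tail] := by
  rw [PySem.Chars.splitOnMax.eq_1]
  rw [if_neg (by norm_num)]
  have : (1 : Int).toNat = 1 := rfl
  rw [this, goSplit c s (s.length + 1) [] [] h (by omega)]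
  simp

-- ----- isIn with a single-character needle -----
theorem isIn_single (c : Char) (s : List Char) : PySem.Chars.isIn [c] s = true ↔ c ∈ s := by
  rw [PySem.Chars.isIn_iff_infix, List.singleton_infix_iff]

-- ----- the B-side scan -----
theorem pvScan_append (a : List Char) (c : Char) (r : List Char)
    (hc : c = '-' ∨ c = ':' ∨ c = ',')
    (ha : ∀ x ∈ a, ¬(x = '-' ∨ x = ':' ∨ x = ',')) :
    pvScan (a ++ c :: r) = some (a, r) := by
  induction a with
  | nil => simp [pvScan, hc]
  | cons y ys ih =>
      have hy := ha y (by simp)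
      have := ih (fun x hx => ha x (by simp [hx]))
      simp only [List.cons_append, pvScan, if_neg hy, this]

theorem pvScan_none (s : List Char) (h : ∀ x ∈ s, ¬(x = '-' ∨ x = ':' ∨ x = ',')) :
    pvScan s = none := by
  induction s with
  | nil => rfl
  | cons y ys ih =>
      have hy := h y (by simp)
      simp only [pvScan, if_neg hy, ih (fun x hx => h x (by simp [hx]))]

-- s with c ∈ s decomposes at the first occurrence of c
theorem first_occ_decomp (s : List Char) (c : Char) (h : c ∈ s) :
    s = s.takeWhile (· ≠ c) ++ c :: (s.dropWhile (· ≠ c)).tail := by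
  induction s with
  | nil => simp at h
  | cons x rest ih =>
      by_cases hx : x = c
      · subst hx; simp
      · have hmem : c ∈ rest := by
          cases h with | head => exact (hx rfl).elim | tail _ h' => exact h'
        have hdx : (decide (x ≠ c)) = true := by simp [hx]
        simp only [List.takeWhile_cons, List.dropWhile_cons, hdx, List.cons_append,
          List.cons.injEq, true_and, if_pos trivial]
        exact ih hmem

-- in each separator case of Pre_, both ports split the stripped string at the same place
theorem sep_case (s : List Char) (c : Char)
    (hc : c = '-' ∨ c = ':' ∨ c = ',') (hmem : c ∈ s)
    (hno : ∀ x ∈ s.takeWhile (· ≠ c), ¬(x = '-' ∨ x = ':' ∨ x = ',')) :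
    pvScan s = some (s.takeWhile (· ≠ c), (s.dropWhile (· ≠ c)).tail) := by
  have hdec := first_occ_decomp s c hmem
  calc pvScan s = pvScan (s.takeWhile (· ≠ c) ++ c :: (s.dropWhile (· ≠ c)).tail) := by rw [← hdec]
    _ = some (s.takeWhile (· ≠ c), (s.dropWhile (· ≠ c)).tail) := pvScan_append _ c _ hc hno

theorem mem_of_mem_takeWhile {p : Char → Bool} {l : List Char} {x : Char}
    (h : x ∈ l.takeWhile p) : x ∈ l :=
  (List.takeWhile_sublist p).mem h

-- ===== VERDICT (by name: the statement is the Claim_ definition above) =====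
theorem parse_lines_arg_spec : Claim_equal_parse_lines_arg := by
  intro raw _ hpre
  unfold Spec_parse_lines_arg parse_lines_arg parse_lines_arg_alt
  unfold Pre_parse_lines_arg at hpre
  simp only at hpre ⊢
  by_cases h1 : '-' ∈ PySem.Chars.strip raw.toList
  · rw [if_pos h1] at hpre
    rw [if_pos ((isIn_single _ _).mpr h1)]
    obtain ⟨ha, _⟩ := hpre
    rw [sep_case _ '-' (by simp) h1 (fun x hx => by
      have h2 := (pvIntLit_ne _ ha hx)
      have h3 : x ≠ '-' := by simpa using List.mem_takeWhile_imp hx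
      rintro (rfl | rfl | rfl) <;> simp_all)]
    unfold pvSplitInt
    rw [splitOnMax_single _ _ h1]
  · rw [if_neg h1] at hpre
    rw [if_neg (by simpa [isIn_single] using h1)]
    by_cases h2 : ':' ∈ PySem.Chars.strip raw.toList
    · rw [if_pos h2] at hpre
      rw [if_pos ((isIn_single _ _).mpr h2)]
      obtain ⟨ha, _⟩ := hpre
      rw [sep_case _ ':' (by simp) h2 (fun x hx => by
        have hlit := (pvIntLit_ne _ ha hx)
        have hxs : x ∈ PySem.Chars.strip raw.toList := mem_of_mem_takeWhile hx
        rintro (rfl | rfl | rfl) <;> simp_all)]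
      unfold pvSplitInt
      rw [splitOnMax_single _ _ h2]
    · rw [if_neg h2] at hpre
      rw [if_neg (by simpa [isIn_single] using h2)]
      by_cases h3 : ',' ∈ PySem.Chars.strip raw.toList
      · rw [if_pos h3] at hpre
        rw [if_pos ((isIn_single _ _).mpr h3)]
        obtain ⟨ha, _⟩ := hpre
        rw [sep_case _ ',' (by simp) h3 (fun x hx => by
          have hxs : x ∈ PySem.Chars.strip raw.toList := mem_of_mem_takeWhile hx
          have h4 : x ≠ ',' := by simpa using List.mem_takeWhile_imp hx
          rintro (rfl | rfl | rfl) <;> simp_all)]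
        unfold pvSplitInt
        rw [splitOnMax_single _ _ h3]
      · rw [if_neg (by simpa [isIn_single] using h3)]
        rw [pvScan_none _ (fun x hx => by rintro (rfl | rfl | rfl) <;> simp_all)]
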